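-- pv_equiv track=rewrite | github.com/CodeCraftedCrew/sim-ia | map/relation_handler.py | map_restrictions_by_direction
-- ===== SOURCE A (Python) =====
-- def map_restrictions_by_direction(restrictions):
--
--     left, right, straight = True, True, True
--
--     for restriction in restrictions:
--
--         if restriction == "no_left_turn":
--             left = False
--
--         elif restriction == "no_right_turn":
--             right = False
--
--         elif restriction == "no_straight_on":
--             straight = False
--
--         elif restriction == "only_left_turn":
--             right = False
--             straight = False
--
--         elif restriction == "only_right_turn":
--             left = False
--             straight = False
--
--         elif restriction == "only_straight_on":
--             right = False
--             left = False
--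
--     return left, right, straight
-- ===== SOURCE B (Python) =====
-- def map_restrictions_by_direction(restrictions):
--     left = not any(r in ("no_left_turn", "only_right_turn", "only_straight_on") for r in restrictions)
--     right = not any(r in ("no_right_turn", "only_left_turn", "only_straight_on") for r in restrictions)
--     straight = not any(r in ("no_straight_on", "only_left_turn", "only_right_turn") for r in restrictions)
--     return left, right, straight
-- ===== Notes on version B (the rewrite author's own statement) =====
-- stated objective: simpler
-- what changed: Replaces the single accumulating branch-scan with three independent negated membership checks, one per direction flag.
import Mathlib
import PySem

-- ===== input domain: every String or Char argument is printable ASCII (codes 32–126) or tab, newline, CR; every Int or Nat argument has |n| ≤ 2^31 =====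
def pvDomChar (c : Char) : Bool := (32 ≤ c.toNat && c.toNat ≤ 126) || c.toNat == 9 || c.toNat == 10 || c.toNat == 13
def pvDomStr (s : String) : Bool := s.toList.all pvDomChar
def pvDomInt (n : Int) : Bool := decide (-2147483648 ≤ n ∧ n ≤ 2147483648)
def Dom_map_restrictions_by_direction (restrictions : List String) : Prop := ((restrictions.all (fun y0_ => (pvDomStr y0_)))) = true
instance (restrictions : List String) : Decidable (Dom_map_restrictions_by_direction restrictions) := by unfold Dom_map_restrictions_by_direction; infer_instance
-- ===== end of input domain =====

-- B derives each direction flag by an independent negated membership check instead of A's single accumulating branch-scan (objective: simpler).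


-- ===== PORT A =====
-- literal transliteration of A: one fold over the list carrying (left, right, straight)
def map_restrictions_by_direction (restrictions : List String) : Bool × Bool × Bool :=
  restrictions.foldl
    (fun st restriction =>
      let left := st.1; let right := st.2.1; let straight := st.2.2
      if restriction == "no_left_turn" then (false, right, straight)
      else if restriction == "no_right_turn" then (left, false, straight)
      else if restriction == "no_straight_on" then (left, right, false)
      else if restriction == "only_left_turn" then (left, false, false)
      else if restriction == "only_right_turn" then (false, right, false)
      else if restriction == "only_straight_on" then (false, false, straight)
      else (left, right, straight))
    (true, true, true)

-- ===== PORT B =====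
-- literal transliteration of B: three independent negated membership checks
def map_restrictions_by_direction_alt (restrictions : List String) : Bool × Bool × Bool :=
  let left := !(restrictions.any (fun r => r == "no_left_turn" || r == "only_right_turn" || r == "only_straight_on"))
  let right := !(restrictions.any (fun r => r == "no_right_turn" || r == "only_left_turn" || r == "only_straight_on"))
  let straight := !(restrictions.any (fun r => r == "no_straight_on" || r == "only_left_turn" || r == "only_right_turn"))
  (left, right, straight)

-- ===== PRECONDITION & SPEC =====
def Spec_map_restrictions_by_direction (restrictions : List String) (out : Bool × Bool × Bool) : Prop := out = map_restrictions_by_direction_alt restrictions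
instance (restrictions : List String) (out : Bool × Bool × Bool) : Decidable (Spec_map_restrictions_by_direction restrictions out) := by unfold Spec_map_restrictions_by_direction; infer_instance

-- ===== CLAIM (what is proved, stated in full; the proofs are below) =====
def Claim_equal_map_restrictions_by_direction : Prop := ∀ (restrictions : List String), Dom_map_restrictions_by_direction restrictions → Spec_map_restrictions_by_direction restrictions (map_restrictions_by_direction restrictions)

-- ===== LEMMAS AND PROOFS =====

-- generalised loop invariant: the fold from any start state equals the three
-- membership checks conjoined with the start state's components
theorem pv_fold_inv (restrictions : List String) (l r s : Bool) :
    restrictions.foldl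
      (fun st restriction =>
        let left := st.1; let right := st.2.1; let straight := st.2.2
        if restriction == "no_left_turn" then (false, right, straight)
        else if restriction == "no_right_turn" then (left, false, straight)
        else if restriction == "no_straight_on" then (left, right, false)
        else if restriction == "only_left_turn" then (left, false, false)
        else if restriction == "only_right_turn" then (false, right, false)
        else if restriction == "only_straight_on" then (false, false, straight)
        else (left, right, straight))
      (l, r, s)
    = (l && !(restrictions.any (fun x => x == "no_left_turn" || x == "only_right_turn" || x == "only_straight_on")),
       r && !(restrictions.any (fun x => x == "no_right_turn" || x == "only_left_turn" || x == "only_straight_on")),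
       s && !(restrictions.any (fun x => x == "no_straight_on" || x == "only_left_turn" || x == "only_right_turn"))) := by
  induction restrictions generalizing l r s with
  | nil => simp
  | cons hd tl ih =>
    simp only [List.foldl_cons, List.any_cons]
    split_ifs with h1 h2 h3 h4 h5 h6 <;> rw [ih] <;> clear ih <;>
      cases l <;> cases r <;> cases s <;> simp_all

-- ===== VERDICT (by name: the statement is the Claim_ definition above) =====
theorem map_restrictions_by_direction_spec : Claim_equal_map_restrictions_by_direction := by
  intro restrictions _
  show map_restrictions_by_direction restrictions = map_restrictions_by_direction_alt restrictions
  unfold map_restrictions_by_direction map_restrictions_by_direction_alt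
  rw [pv_fold_inv]
  simp
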